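-- pv_equiv track=rewrite | github.com/junhaz4/leetcode-notes | OA&Interview/DRW.py | solution
-- ===== SOURCE A (Python) =====
-- def solution(A):
--     def get_count(idx, cur_sum, arr):
--         n = len(arr)
--         if idx >= n-1:
--             return 0
--         count = 0
--         if arr[idx] + arr[idx+1] == cur_sum:
--             count = 1 + get_count(idx+2,cur_sum,arr)
--         return max(count,get_count(idx+1,cur_sum,arr))
--     n = len(A)
--     count = 0
--     for i in range(0,n-1):
--         cur_sum = A[i]+A[i+1]
--         count = max(count,1+get_count(i+2,cur_sum,A))
--     return count
-- ===== SOURCE B (Python) =====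
-- def solution(A):
--     n = len(A)
--     best = 0
--     for i in range(0, n - 1):
--         s = A[i] + A[i + 1]
--         # rolling backward DP: a = best pair count from index j, b = from index j+1
--         a = b = 0
--         for j in range(n - 2, i + 1, -1):
--             take = 1 + b if A[j] + A[j + 1] == s else 0
--             a, b = max(a, take), a
--         best = max(best, 1 + a)
--     return best
-- ===== Notes on version B (the rewrite author's own statement) =====
-- stated objective: faster
-- what changed: replaces the exponential branching recursion get_count with a bottom-up rolling-pair dynamic program scanned backwards once per starting pair; intended as faster (measured 4.56x at the largest size both finish; A times out beyond)
import Mathlib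
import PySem

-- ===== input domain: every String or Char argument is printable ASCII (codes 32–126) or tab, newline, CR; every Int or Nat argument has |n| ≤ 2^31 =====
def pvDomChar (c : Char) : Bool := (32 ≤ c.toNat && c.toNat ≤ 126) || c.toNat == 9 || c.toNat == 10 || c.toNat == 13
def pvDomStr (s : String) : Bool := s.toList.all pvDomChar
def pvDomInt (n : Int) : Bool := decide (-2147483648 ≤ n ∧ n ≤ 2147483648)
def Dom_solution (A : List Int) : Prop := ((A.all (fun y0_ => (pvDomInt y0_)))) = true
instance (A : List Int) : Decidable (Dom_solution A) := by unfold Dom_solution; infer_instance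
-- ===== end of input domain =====

-- B replaces A's branching recursion by a bottom-up rolling-pair DP; intended as faster (measured 4.56x at the largest size both finish, A timed out beyond that).

-- ===== PORT A =====
-- literal port of A's inner recursion get_count(idx, cur_sum, arr)
def getCount (idx : Int) (curSum : Int) (arr : List Int) : Int :=
  let n : Int := arr.length
  if idx ≥ n - 1 then 0
  else
    let count : Int :=
      if PySem.List.pyGetD arr idx 0 + PySem.List.pyGetD arr (idx + 1) 0 = curSum
      then 1 + getCount (idx + 2) curSum arr else 0
    max count (getCount (idx + 1) curSum arr)
termination_by ((arr.length : Int) - idx).toNat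
decreasing_by all_goals omega

def solution (A : List Int) : Int :=
  let n : Int := A.length
  (PySem.List.pyRange 0 (n - 1) 1).foldl (fun count i =>
    let curSum := PySem.List.pyGetD A i 0 + PySem.List.pyGetD A (i + 1) 0
    max count (1 + getCount (i + 2) curSum A)) 0

-- ===== PORT B =====
def solution_alt (A : List Int) : Int :=
  let n : Int := A.length
  (PySem.List.pyRange 0 (n - 1) 1).foldl (fun best i =>
    let s := PySem.List.pyGetD A i 0 + PySem.List.pyGetD A (i + 1) 0
    let ab := (PySem.List.pyRange (n - 2) (i + 1) (-1)).foldl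
      (fun (ab : Int × Int) j =>
        let take := if PySem.List.pyGetD A j 0 + PySem.List.pyGetD A (j + 1) 0 = s
          then 1 + ab.2 else 0
        (max ab.1 take, ab.1)) (0, 0)
    max best (1 + ab.1)) 0

-- ===== PRECONDITION & SPEC =====
def Spec_solution (A : List Int) (out : Int) : Prop := out = solution_alt A
instance (A : List Int) (out : Int) : Decidable (Spec_solution A out) := by unfold Spec_solution; infer_instance

-- ===== CLAIM (what is proved, stated in full; the proofs are below) =====
def Claim_equal_solution : Prop := ∀ (A : List Int), Dom_solution A → Spec_solution A (solution A)


-- ===== LEMMAS AND PROOFS =====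

theorem getCount_of_ge (A : List Int) (s j : Int) (h : (A.length : Int) - 1 ≤ j) :
    getCount j s A = 0 := by
  rw [getCount]
  simp only [ge_iff_le]
  rw [if_pos h]

theorem getCount_of_lt (A : List Int) (s j : Int) (h : j < (A.length : Int) - 1) :
    getCount j s A =
      max (if PySem.List.pyGetD A j 0 + PySem.List.pyGetD A (j + 1) 0 = s
            then 1 + getCount (j + 2) s A else 0)
          (getCount (j + 1) s A) := by
  rw [getCount]
  simp only [ge_iff_le]
  rw [if_neg (by omega)]

-- the rolling-pair fold over [start, n-1) processed back-to-front computes (get_count start, get_count (start+1))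
theorem rolling_eq_getCount (A : List Int) (s : Int) (start : Int) :
    ((PySem.List.pyRange start ((A.length : Int) - 1) 1).reverse).foldl
      (fun (ab : Int × Int) j =>
        let take := if PySem.List.pyGetD A j 0 + PySem.List.pyGetD A (j + 1) 0 = s
          then 1 + ab.2 else 0
        (max ab.1 take, ab.1)) (0, 0)
      = (getCount start s A, getCount (start + 1) s A) := by
  by_cases h : (A.length : Int) - 1 ≤ start
  · rw [PySem.List.pyRange_one_eq_nil h]
    rw [getCount_of_ge A s start h, getCount_of_ge A s (start + 1) (by omega)]
    simp
  · push Not at h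
    rw [PySem.List.pyRange_one_cons h, List.reverse_cons, List.foldl_append,
        rolling_eq_getCount A s (start + 1)]
    simp only [List.foldl_cons, List.foldl_nil]
    rw [getCount_of_lt A s start h]
    have h2 : start + 1 + 1 = start + 2 := by ring
    rw [h2, max_comm]
termination_by ((A.length : Int) - start).toNat
decreasing_by omega

-- ===== VERDICT (by name: the statement is the Claim_ definition above) =====
theorem solution_spec : Claim_equal_solution := by
  intro A _
  show solution A = solution_alt A
  unfold solution solution_alt
  simp only []
  congr 1
  funext best i
  have hrange : PySem.List.pyRange ((A.length : Int) - 2) (i + 1) (-1)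
      = (PySem.List.pyRange (i + 2) ((A.length : Int) - 1) 1).reverse := by
    rw [PySem.List.pyRange_neg_one_eq_reverse]
    congr 1; ring_nf
  simp only [hrange, rolling_eq_getCount]
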